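-- pv_equiv track=rewrite | github.com/Mayorwa/The-Waltz | leetcode/SumOfNumRev-2443.py | sumOfNumberAndReverse
-- ===== SOURCE A (Python) =====
-- def sumOfNumberAndReverse(num) -> bool:
--     if num == 0:
--         return True
--     r = num // 2
--     for i in range(r, num):
--         s = int(str(i)[::-1])
--         if i + s == num:
--             return True
--
--     return False
-- ===== SOURCE B (Python) =====
-- def _inner(k, m):
--     # can m be written as sum(s_j * 10**j for j < k) with s symmetric,
--     # 0 <= s_j <= 18, and (for odd k) an even middle entry?
--     if k == 0:
--         return m == 0
--     if k == 1:
--         return m % 2 == 0 and m <= 18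
--     for s in (m % 10, m % 10 + 10):      # outer pair sum is m mod 10, up to a carry
--         if s <= 18:
--             r = m - s * (10 ** (k - 1) + 1)
--             if r >= 0 and r // 10 <= 2 * (10 ** (k - 2) - 1) and _inner(k - 2, r // 10):
--                 return True
--     return False
--
--
-- def _feasible(k, m):
--     # same, but the outermost pair sum must be >= 1 (i has no leading zero)
--     if k == 1:
--         return m % 2 == 0 and 2 <= m <= 18
--     for s in (m % 10, m % 10 + 10):
--         if 1 <= s <= 18:
--             r = m - s * (10 ** (k - 1) + 1)
--             if r >= 0 and _inner(k - 2, r // 10):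
--                 return True
--     return False
--
--
-- def _num_digits(m):
--     return 1 if m < 10 else 1 + _num_digits(m // 10)
--
--
-- def sumOfNumberAndReverse(num) -> bool:
--     if num < 0:
--         return False
--     if num == 0:
--         return True
--     d = _num_digits(num)
--     for length in range(1, d + 1):
--         if _feasible(length, num):
--             return True
--     return False
-- ===== Notes on version B (the rewrite author's own statement) =====
-- stated objective: faster
-- what changed: B replaces A's brute-force scan of candidates i with a digit DP: num = i + reverse(i) iff num is a sum of symmetric digit-pair contributions s_j*(10^j+10^(k-1-j)), and B peels the outermost pair arithmetically (s is determined mod 10, at most two candidates, interval pruning keeps one branch) and recurses on the inner number, trying each digit length k.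
import Mathlib
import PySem

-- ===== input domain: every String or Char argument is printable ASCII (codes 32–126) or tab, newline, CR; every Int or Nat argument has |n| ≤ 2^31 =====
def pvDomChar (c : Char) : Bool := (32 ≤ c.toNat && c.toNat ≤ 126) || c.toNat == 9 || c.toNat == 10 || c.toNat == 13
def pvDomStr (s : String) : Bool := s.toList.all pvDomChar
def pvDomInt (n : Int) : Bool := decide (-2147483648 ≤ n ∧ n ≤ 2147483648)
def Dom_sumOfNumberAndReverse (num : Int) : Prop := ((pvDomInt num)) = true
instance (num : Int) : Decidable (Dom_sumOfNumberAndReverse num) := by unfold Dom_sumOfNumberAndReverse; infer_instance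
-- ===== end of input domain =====

-- B replaces A's brute-force scan of candidates i by a digit DP: num = i + reverse(i) iff num is a
-- symmetric sum Σ s_j (10^j + 10^(k-1-j)); B peels the outermost pair arithmetically (the pair sum
-- is determined mod 10) and recurses on the inner number, for each candidate digit length k.

-- ===== PORT A =====
def sumOfNumberAndReverse (num : Int) : Bool :=
  if num == 0 then true
  else
    -- r = num // 2, used inline as the range start
    (PySem.List.pyRange (PySem.Int.floordiv num 2) num 1).any (fun i =>
      match PySem.Str.slice? (PySem.Int.toStr i) none none (-1) with
      | none => false  -- unreachable: the slice step -1 is nonzero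
      | some rev =>
        match PySem.Int.ofStr? rev with
        | none => false  -- unreachable: str(i) reversed always parses for the i ≥ 0 this loop visits
        | some s => i + s == num)

-- ===== PORT B =====
-- _inner(k, m): the for-loop over the literal pair (m%10, m%10+10) is unrolled into its two
-- iterations in order. Entry calls keep k ≥ 0; for k < 0 Python returns False on every input
-- (the float bound 2*(10**(k-2)-1) is negative while r//10 ≥ 0), ported as the explicit k < 0 guard.
def innerB (k m : Int) : Bool :=
  if k < 0 then false
  else if k == 0 then m == 0
  else if k == 1 then (PySem.Int.mod m 2 == 0) && decide (m ≤ 18)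
  else
    (if PySem.Int.mod m 10 ≤ 18 then
       (let r := m - PySem.Int.mod m 10 * ((10 : Int) ^ (k - 1).toNat + 1)
        if 0 ≤ r ∧ PySem.Int.floordiv r 10 ≤ 2 * ((10 : Int) ^ (k - 2).toNat - 1) then
          innerB (k - 2) (PySem.Int.floordiv r 10)
        else false)
     else false)
    ||
    (if PySem.Int.mod m 10 + 10 ≤ 18 then
       (let r := m - (PySem.Int.mod m 10 + 10) * ((10 : Int) ^ (k - 1).toNat + 1)
        if 0 ≤ r ∧ PySem.Int.floordiv r 10 ≤ 2 * ((10 : Int) ^ (k - 2).toNat - 1) then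
          innerB (k - 2) (PySem.Int.floordiv r 10)
        else false)
     else false)
termination_by k.toNat
decreasing_by
  all_goals
    simp only [beq_iff_eq] at *
    omega

-- _feasible(k, m): same unrolling of the two-candidate loop
def feasibleB (k m : Int) : Bool :=
  if k == 1 then (PySem.Int.mod m 2 == 0) && decide (2 ≤ m) && decide (m ≤ 18)
  else
    (if 1 ≤ PySem.Int.mod m 10 ∧ PySem.Int.mod m 10 ≤ 18 then
       (let r := m - PySem.Int.mod m 10 * ((10 : Int) ^ (k - 1).toNat + 1)
        if 0 ≤ r then innerB (k - 2) (PySem.Int.floordiv r 10) else false)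
     else false)
    ||
    (if 1 ≤ PySem.Int.mod m 10 + 10 ∧ PySem.Int.mod m 10 + 10 ≤ 18 then
       (let r := m - (PySem.Int.mod m 10 + 10) * ((10 : Int) ^ (k - 1).toNat + 1)
        if 0 ≤ r then innerB (k - 2) (PySem.Int.floordiv r 10) else false)
     else false)

-- _num_digits(m)
def numDigitsB (m : Int) : Int :=
  if m < 10 then 1 else 1 + numDigitsB (PySem.Int.floordiv m 10)
termination_by m.toNat
decreasing_by
  rw [PySem.Int.floordiv_eq_ediv_of_pos (by omega)]
  omega

def sumOfNumberAndReverse_alt (num : Int) : Bool :=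
  if num < 0 then false
  else if num == 0 then true
  else
    (PySem.List.pyRange 1 (numDigitsB num + 1) 1).any (fun len => feasibleB len num)

-- ===== PRECONDITION & SPEC =====
def Spec_sumOfNumberAndReverse (num : Int) (out : Bool) : Prop := out = sumOfNumberAndReverse_alt num
instance (num : Int) (out : Bool) : Decidable (Spec_sumOfNumberAndReverse num out) := by unfold Spec_sumOfNumberAndReverse; infer_instance

-- ===== CLAIM (what is proved, stated in full; the proofs are below) =====
def Claim_equal_sumOfNumberAndReverse : Prop := ∀ (num : Int), Dom_sumOfNumberAndReverse num → Spec_sumOfNumberAndReverse num (sumOfNumberAndReverse num)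

-- ===== LEMMAS AND PROOFS =====

-- the decimal reversal of n (digits of n read least-significant first)
def natRev (n : ℕ) : ℕ := Nat.ofDigits 10 (Nat.digits 10 n).reverse

-- i + natRev i, expressed on a digit list
def pairSum (t : List ℕ) : ℕ := Nat.ofDigits 10 t + Nat.ofDigits 10 t.reverse

lemma digit_not_space {c : Char} (h : c.isDigit = true) : PySem.Int.isIntSpace c = false := by
  revert h
  simp only [Char.isDigit, PySem.Int.isIntSpace, Bool.or_eq_false_iff, decide_eq_false_iff_not,
    Bool.and_eq_true, decide_eq_true_eq]
  rintro ⟨h1, h2⟩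
  refine ⟨⟨⟨⟨⟨?_,?_⟩,?_⟩,?_⟩,?_⟩,?_⟩ <;> rintro rfl <;> simp_all

lemma dropWhile_digits {l : List Char} (h : ∀ d ∈ l, d.isDigit = true) :
    List.dropWhile PySem.Int.isIntSpace l = l := by
  apply List.dropWhile_eq_self_iff.mpr
  intro hl
  simp [digit_not_space (h _ (List.getElem_mem hl))]

-- int() on a nonempty all-digit character list parses by the usual left fold
lemma parse_digits (c : Char) (ds : List Char) (hc : c.isDigit = true)
    (hds : ∀ d ∈ ds, d.isDigit = true) :
    PySem.Int.ofChars? (c :: ds) =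
      some ((ds.foldl (fun a d => a * 10 + (d.toNat - '0'.toNat)) (c.toNat - '0'.toNat) : Nat) : Int) := by
  have hall : ∀ d ∈ c :: ds, d.isDigit = true := by
    intro d hd
    rcases List.mem_cons.mp hd with rfl | hd
    · exact hc
    · exact hds _ hd
  have hrev : ∀ d ∈ (c :: ds).reverse, d.isDigit = true := by
    intro d hd; exact hall d (List.mem_reverse.mp hd)
  simp only [PySem.Int.ofChars?, dropWhile_digits hall, dropWhile_digits hrev, List.reverse_reverse]
  split
  · rename_i ds' heq
    injection heq with h1 h2; exact absurd h1 (by rintro rfl; simp [Char.isDigit] at hc)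
  · rename_i ds' heq
    injection heq with h1 h2; exact absurd h1 (by rintro rfl; simp [Char.isDigit] at hc)
  · rename_i cs hne1 hne2
    simp only [Option.pure_def, Option.bind_eq_bind]
    rw [show (fun (a : Nat) => some ((a : Int))) = (some ∘ (fun (a : Nat) => (a : Int))) from rfl,
        ← Option.map_eq_bind]
    simp only [Option.map_map]
    rw [Option.map_eq_some_iff]
    refine ⟨_, ?_, rfl⟩
    conv_lhs => whnf
    rw [hc]
    conv_lhs => whnf
    simp only [Nat.zero_mul, Nat.zero_add]
    generalize (c.toNat - '0'.toNat : Nat) = acc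
    clear hall hrev hc hne1 hne2
    conv_lhs => whnf
    revert hds
    induction ds generalizing acc with
    | nil =>
      intro _
      conv_lhs => whnf
      rfl
    | cons d ds ih =>
      intro hds
      conv_lhs => whnf
      rw [hds d (List.mem_cons_self)]
      conv_lhs => whnf
      simp only [List.foldl]
      exact ih _ (fun x hx => hds x (List.mem_cons_of_mem _ hx))

lemma digitChar_val {d : ℕ} (h : d < 10) : (Nat.digitChar d).toNat - 48 = d := by
  interval_cases d <;> decide

-- str(n) maps to the digits of n, most significant first
lemma valmap (n : ℕ) (hn : 0 < n) :
    (Nat.toDigits 10 n).map (fun c => c.toNat - '0'.toNat) = (Nat.digits 10 n).reverse := by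
  induction n using Nat.strong_induction_on with
  | _ n ih =>
    rcases Nat.lt_or_ge n 10 with h | h
    · rw [Nat.toDigits_of_lt_base h, Nat.digits_def' (by norm_num) hn,
        Nat.mod_eq_of_lt h, Nat.div_eq_of_lt h]
      simp
      exact digitChar_val h
    · rw [Nat.toDigits_eq_if (by norm_num)]
      rw [if_neg (by omega)]
      rw [List.map_append, ih (n / 10) (by omega) (by omega),
        Nat.digits_def' (by norm_num) hn]
      simp
      exact digitChar_val (Nat.mod_lt _ (by norm_num))

lemma foldv (l : List ℕ) : ∀ (acc : ℕ),
    l.foldl (fun a d => a * 10 + d) acc = Nat.ofDigits 10 l.reverse + acc * 10 ^ l.length := by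
  induction l with
  | nil => intro acc; simp
  | cons d l ih =>
    intro acc
    simp only [List.foldl, List.reverse_cons, Nat.ofDigits_append, List.length_cons, ih,
      List.length_reverse, Nat.ofDigits_cons, Nat.ofDigits_nil]
    ring

-- int(str(n)[::-1]) = natRev n
lemma bridge (n : ℕ) :
    PySem.Int.ofChars? ((Nat.toDigits 10 n).reverse) = some ((natRev n : ℕ) : Int) := by
  rcases Nat.eq_zero_or_pos n with rfl | hn
  · decide
  · have hne : (Nat.toDigits 10 n).reverse ≠ [] := by
      have := Nat.length_toDigits_pos (b := 10) (n := n)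
      intro h
      rw [← List.length_eq_zero_iff, List.length_reverse] at h
      omega
    obtain ⟨c, ds, h⟩ := List.exists_cons_of_ne_nil hne
    have hmem : ∀ d ∈ c :: ds, d.isDigit = true := by
      intro d hd
      rw [← h] at hd
      exact Nat.isDigit_of_mem_toDigits (by norm_num) (by norm_num) (List.mem_reverse.mp hd)
    rw [h, parse_digits c ds (hmem c List.mem_cons_self)
      (fun d hd => hmem d (List.mem_cons_of_mem _ hd))]
    congr 1
    have h0 : (ds.foldl (fun a d => a * 10 + (d.toNat - '0'.toNat)) (c.toNat - '0'.toNat) : ℕ)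
        = (c :: ds).foldl (fun a d => a * 10 + (d.toNat - '0'.toNat)) 0 := by
      simp [List.foldl]
    rw [h0, ← h, ← List.foldl_map (f := fun c : Char => c.toNat - '0'.toNat)
      (g := fun a d => a * 10 + d), List.map_reverse, valmap n hn, List.reverse_reverse, foldv]
    simp [natRev]

lemma natRev_pos {n : ℕ} (hn : 0 < n) : 0 < natRev n := by
  unfold natRev
  have hne : (Nat.digits 10 n).reverse ≠ [] := by
    simp [Nat.digits_ne_nil_iff_ne_zero]; omega
  obtain ⟨a, l, h⟩ := List.exists_cons_of_ne_nil hne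
  have ha : a ≠ 0 := by
    have h2 := List.head_reverse hne
    simp only [h, List.head_cons] at h2
    rw [h2]
    exact Nat.getLast_digit_ne_zero 10 (by omega)
  rw [h, Nat.ofDigits_cons]
  omega

-- A's per-element check computes i + natRev i == num (for the i ≥ 0 the loop visits)
lemma A_inner (num i : Int) (hi : 0 ≤ i) :
    (match PySem.Str.slice? (PySem.Int.toStr i) none none (-1) with
      | none => false
      | some rev =>
        match PySem.Int.ofStr? rev with
        | none => false
        | some s => i + s == num) = (i + ((natRev i.toNat : ℕ) : Int) == num) := by
  rw [PySem.Str.slice?_none_none_neg_one]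
  simp only [PySem.Int.toList_toStr]
  rw [PySem.Int.ofStr?_ofList]
  rw [show PySem.Int.toChars i = Nat.toDigits 10 i.toNat by
    rw [PySem.Int.toChars, if_neg (by omega)]]
  rw [bridge i.toNat]

lemma natRev_lt_of_dvd {n : ℕ} (h10 : 10 ∣ n) (hn : 0 < n) : natRev n < n := by
  obtain ⟨m, rfl⟩ := h10
  have hm : 0 < m := by omega
  have hd : Nat.digits 10 (10 * m) = 0 :: Nat.digits 10 m := by
    rw [Nat.digits_def' (by norm_num) hn]
    simp [Nat.mul_div_cancel_left _ (by norm_num : (0:ℕ) < 10)]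
  have h1 : natRev (10 * m) = natRev m := by
    unfold natRev
    rw [hd]
    simp [Nat.ofDigits_append]
  have h2 : natRev m < 10 ^ (Nat.digits 10 m).length := by
    unfold natRev
    have := Nat.ofDigits_lt_base_pow_length (b := 10) (l := (Nat.digits 10 m).reverse)
      (by norm_num) (fun x hx => Nat.digits_lt_base (by norm_num) (List.mem_reverse.mp hx))
    simpa using this
  have h3 : 10 ^ (Nat.digits 10 m).length ≤ 10 * m :=
    Nat.base_pow_length_digits_le 10 m (by norm_num) (by omega)
  omega

lemma natRev_natRev {n : ℕ} (hnd : ¬ 10 ∣ n) : natRev (natRev n) = n := by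
  have hn : 0 < n := by
    rcases Nat.eq_zero_or_pos n with rfl | h
    · exact absurd (dvd_zero 10) hnd
    · exact h
  have hne : Nat.digits 10 n ≠ [] := Nat.digits_ne_nil_iff_ne_zero.mpr (by omega)
  have hd : Nat.digits 10 (natRev n) = (Nat.digits 10 n).reverse := by
    unfold natRev
    apply Nat.digits_ofDigits 10 (by norm_num)
    · exact fun x hx => Nat.digits_lt_base (by norm_num) (List.mem_reverse.mp hx)
    · intro h
      rw [List.getLast_reverse h]
      have hdd : Nat.digits 10 n = n % 10 :: Nat.digits 10 (n / 10) :=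
        Nat.digits_def' (by norm_num) hn
      simp only [hdd, List.head_cons]
      intro hcontra
      exact hnd (Nat.dvd_of_mod_eq_zero hcontra)
  conv_lhs => rw [natRev, hd, List.reverse_reverse]
  exact Nat.ofDigits_digits 10 n

-- completeness of A's range [num//2, num): any witness below num//2 mirrors to one inside
lemma range_equiv (num : Int) (hnum : 1 ≤ num) :
    ((PySem.List.pyRange (PySem.Int.floordiv num 2) num 1).any
        (fun i => i + ((natRev i.toNat : ℕ) : Int) == num)) =
      ((PySem.List.pyRange 0 (num + 1) 1).any
        (fun i => i + ((natRev i.toNat : ℕ) : Int) == num)) := by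
  have hr := (PySem.Int.floordiv_eq_iff_of_pos (a := num) (b := 2) (q := PySem.Int.floordiv num 2)
    (by norm_num)).mp rfl
  set r := PySem.Int.floordiv num 2 with hrdef
  rw [Bool.eq_iff_iff]
  simp only [List.any_eq_true, PySem.List.mem_pyRange_one, beq_iff_eq]
  constructor
  · rintro ⟨i, ⟨h1, h2⟩, hq⟩
    exact ⟨i, ⟨by omega, by omega⟩, hq⟩
  · rintro ⟨i, ⟨h0, h1⟩, hq⟩
    have hipos : 1 ≤ i := by
      rcases Int.lt_or_le 0 i with h | h
      · omega
      · exfalso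
        have hi0 : i = 0 := by omega
        subst hi0
        simp [natRev] at hq
        omega
    have hiltnum : i < num := by
      rcases Int.lt_or_le i num with h | h
      · exact h
      · exfalso
        have : i = num := by omega
        subst this
        have : (natRev i.toNat : Int) = 0 := by omega
        have hp := natRev_pos (n := i.toNat) (by omega)
        omega
    rcases Int.lt_or_le i r with hcase | hcase
    swap
    · exact ⟨i, ⟨hcase, hiltnum⟩, by omega⟩
    · by_cases hdvd : 10 ∣ i.toNat
      · exfalso
        have := natRev_lt_of_dvd hdvd (by omega)
        have : (natRev i.toNat : Int) < i := by omega
        omega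
      · refine ⟨(natRev i.toNat : Int), ⟨by omega, by omega⟩, ?_⟩
        have htn : ((natRev i.toNat : Int)).toNat = natRev i.toNat := by omega
        rw [htn, natRev_natRev hdvd]
        omega

-- ---- B-side: correctness of the digit DP ----

-- peeling the outer digit pair off pairSum
lemma pairSum_decomp (x y : ℕ) (t : List ℕ) :
    pairSum (x :: (t ++ [y])) = (x + y) * (10 ^ (t.length + 1) + 1) + 10 * pairSum t := by
  simp only [pairSum, List.reverse_cons, List.reverse_append, List.reverse_nil,
    List.nil_append, Nat.ofDigits_cons, Nat.ofDigits_append,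
    Nat.ofDigits_nil, List.length_reverse, List.singleton_append, List.length_cons]
  ring

lemma pairSum_le {t : List ℕ} (h : ∀ d ∈ t, d ≤ 9) : pairSum t ≤ 2 * (10 ^ t.length - 1) := by
  have h1 := Nat.ofDigits_lt_base_pow_length (b := 10) (l := t) (by norm_num)
    (fun x hx => by have := h x hx; omega)
  have h2 := Nat.ofDigits_lt_base_pow_length (b := 10) (l := t.reverse) (by norm_num)
    (fun x hx => by have := h x (List.mem_reverse.mp hx); omega)
  rw [List.length_reverse] at h2
  have hp : 1 ≤ 10 ^ t.length := Nat.one_le_pow _ _ (by norm_num)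
  unfold pairSum
  omega

lemma shape_of_length {t : List ℕ} {n : ℕ} (h : t.length = n + 2) :
    ∃ x t' y, t = x :: (t' ++ [y]) ∧ t'.length = n := by
  cases t with
  | nil => simp at h
  | cons x tl =>
    have hne : tl ≠ [] := by intro hh; subst hh; simp at h
    refine ⟨x, tl.dropLast, tl.getLast hne, ?_, ?_⟩
    · rw [List.dropLast_append_getLast hne]
    · have h2 : tl.dropLast.length = tl.length - 1 := List.length_dropLast
      simp at h; omega

-- one candidate branch of the unrolled loop, in ℕ terms
lemma branch_iff (n m s : ℕ) (hs : s % 10 = m % 10)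
    (IH : ∀ m' : ℕ, innerB (n : Int) (m' : Int) = true ↔
      ∃ t : List ℕ, t.length = n ∧ (∀ d ∈ t, d ≤ 9) ∧ pairSum t = m') :
    ((if (s : Int) ≤ 18 then
       (if 0 ≤ (m : Int) - (s : Int) * ((10 : Int) ^ (n + 1) + 1) ∧
            PySem.Int.floordiv ((m : Int) - (s : Int) * ((10 : Int) ^ (n + 1) + 1)) 10 ≤
              2 * ((10 : Int) ^ n - 1) then
          innerB (n : Int) (PySem.Int.floordiv ((m : Int) - (s : Int) * ((10 : Int) ^ (n + 1) + 1)) 10)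
        else false)
     else false) = true) ↔
    (s ≤ 18 ∧ s * (10 ^ (n + 1) + 1) ≤ m ∧
      ∃ t : List ℕ, t.length = n ∧ (∀ d ∈ t, d ≤ 9) ∧
        s * (10 ^ (n + 1) + 1) + 10 * pairSum t = m) := by
  have hb1 : ((s * (10 ^ (n + 1) + 1) : ℕ) : Int) = (s : Int) * ((10 : Int) ^ (n + 1) + 1) := by
    push_cast; ring
  have hb2 : ((10 ^ n : ℕ) : Int) = (10 : Int) ^ n := by push_cast; ring
  have hq : 1 ≤ 10 ^ n := Nat.one_le_pow _ _ (by norm_num)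
  have hsplit : s * (10 ^ (n + 1) + 1) = 10 * (s * 10 ^ n) + s := by ring
  by_cases h18 : s ≤ 18
  · rw [if_pos (by exact_mod_cast h18)]
    by_cases hle : s * (10 ^ (n + 1) + 1) ≤ m
    · have hr : (m : Int) - (s : Int) * ((10 : Int) ^ (n + 1) + 1)
          = ((m - s * (10 ^ (n + 1) + 1) : ℕ) : Int) := by
        push_cast [hle]; ring
      have hdvd : 10 ∣ (m - s * (10 ^ (n + 1) + 1)) := by omega
      obtain ⟨m', hm'⟩ := hdvd
      have hfd : PySem.Int.floordiv ((m - s * (10 ^ (n + 1) + 1) : ℕ) : Int) 10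
          = ((m' : ℕ) : Int) := by
        have h := PySem.Int.floordiv_natCast (m - s * (10 ^ (n + 1) + 1)) 10
        simp only [Nat.cast_ofNat] at h
        rw [h]
        congr 1
        omega
      rw [hr, hfd]
      by_cases hbd : m' ≤ 2 * (10 ^ n - 1)
      · rw [if_pos (by refine ⟨by positivity, by omega⟩)]
        rw [IH m']
        constructor
        · rintro ⟨t, h1, h2, h3⟩
          exact ⟨h18, hle, t, h1, h2, by omega⟩
        · rintro ⟨_, _, t, h1, h2, h3⟩
          exact ⟨t, h1, h2, by omega⟩
      · rw [if_neg (by rintro ⟨-, hc⟩; exact hbd (by omega))]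
        constructor
        · intro h; cases h
        · rintro ⟨_, _, t, h1, h2, h3⟩
          exfalso
          have hps := pairSum_le h2
          rw [h1] at hps
          omega
    · rw [if_neg (by rintro ⟨hc, -⟩; rw [← hb1] at hc; exact hle (by omega))]
      constructor
      · intro h; cases h
      · rintro ⟨_, hc, -⟩; exact absurd hc hle
  · rw [if_neg (by exact_mod_cast h18)]
    constructor
    · intro h; cases h
    · rintro ⟨hc, -⟩; exact absurd hc h18

-- attaching the outer pair to a digit list from the inner DP
lemma build_outer (n m s : ℕ) (t : List ℕ) (h18 : s ≤ 18) (h1 : t.length = n)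
    (h2 : ∀ d ∈ t, d ≤ 9) (h3 : s * (10 ^ (n + 1) + 1) + 10 * pairSum t = m) :
    ((s - min s 9) :: (t ++ [min s 9])).length = n + 2 ∧
    (∀ d ∈ (s - min s 9) :: (t ++ [min s 9]), d ≤ 9) ∧
    ((s - min s 9) :: (t ++ [min s 9])).getLast?.getD 0 = min s 9 ∧
    pairSum ((s - min s 9) :: (t ++ [min s 9])) = m := by
  refine ⟨by simp [h1], ?_, ?_, ?_⟩
  · intro d hd
    rcases List.mem_cons.mp hd with rfl | hd
    · omega
    rcases List.mem_append.mp hd with hd | hd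
    · exact h2 d hd
    · simp at hd; omega
  · rw [show ((s - min s 9) :: (t ++ [min s 9])) = ((s - min s 9) :: t) ++ [min s 9] by simp,
        List.getLast?_concat, Option.getD_some]
  · rw [pairSum_decomp, h1, show (s - min s 9) + min s 9 = s by omega]
    exact h3

lemma innerB_iff (k : ℕ) : ∀ m : ℕ, innerB (k : Int) (m : Int) = true ↔
    ∃ t : List ℕ, t.length = k ∧ (∀ d ∈ t, d ≤ 9) ∧ pairSum t = m := by
  induction k using Nat.strong_induction_on with
  | _ k ih =>
    intro m
    match k with
    | 0 =>
      rw [innerB]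
      norm_num
      simp [pairSum]
      omega
    | 1 =>
      rw [innerB]
      norm_num
      constructor
      · rintro ⟨h1, h2⟩
        have hdvd : 2 ∣ m := by exact_mod_cast h1
        obtain ⟨c, hc⟩ := hdvd
        refine ⟨[m / 2], rfl, by intro d hd; simp at hd; omega, ?_⟩
        simp [pairSum, Nat.ofDigits]
        omega
      · rintro ⟨t, h1, h2, h3⟩
        rw [List.length_eq_one_iff] at h1
        obtain ⟨a, rfl⟩ := h1
        simp [pairSum, Nat.ofDigits] at h3
        have ha : a ≤ 9 := h2 a (by simp)
        refine ⟨?_, by omega⟩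
        exact_mod_cast (⟨a, by omega⟩ : 2 ∣ m)
    | (n + 2) =>
      have IH : ∀ m' : ℕ, innerB (n : Int) (m' : Int) = true ↔
          ∃ t : List ℕ, t.length = n ∧ (∀ d ∈ t, d ≤ 9) ∧ pairSum t = m' :=
        fun m' => ih n (by omega) m'
      rw [innerB]
      rw [if_neg (by push_cast; omega), if_neg (by simp only [beq_iff_eq]; push_cast; omega),
          if_neg (by simp only [beq_iff_eq]; push_cast; omega)]
      have e1 : ((((n + 2 : ℕ) : Int)) - 1).toNat = n + 1 := by push_cast; omega
      have e2 : ((((n + 2 : ℕ) : Int)) - 2).toNat = n := by push_cast; omega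
      have e3 : (((n + 2 : ℕ) : Int)) - 2 = ((n : ℕ) : Int) := by push_cast; ring
      have hmod : PySem.Int.mod ((m : ℕ) : Int) 10 = ((m % 10 : ℕ) : Int) := by
        simp
      have hadd : ((m % 10 : ℕ) : Int) + 10 = ((m % 10 + 10 : ℕ) : Int) := by push_cast; ring
      rw [e1, e2, e3, hmod, hadd]
      rw [Bool.or_eq_true,
          branch_iff n m (m % 10) (by omega) IH,
          branch_iff n m (m % 10 + 10) (by omega) IH]
      have hsp : ∀ s : ℕ, s * (10 ^ (n + 1) + 1) = 10 * (s * 10 ^ n) + s := fun s => by ring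
      constructor
      · rintro (⟨h18, hle, t, h1, h2, h3⟩ | ⟨h18, hle, t, h1, h2, h3⟩)
        · obtain ⟨g1, g2, -, g4⟩ := build_outer n m (m % 10) t h18 h1 h2 h3
          exact ⟨_, g1, g2, g4⟩
        · obtain ⟨g1, g2, -, g4⟩ := build_outer n m (m % 10 + 10) t h18 h1 h2 h3
          exact ⟨_, g1, g2, g4⟩
      · rintro ⟨t, hlen, hdig, hsum⟩
        obtain ⟨x, t', y, rfl, hlen'⟩ := shape_of_length hlen
        have hx : x ≤ 9 := hdig x (by simp)
        have hy : y ≤ 9 := hdig y (by simp)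
        have hm : (x + y) * (10 ^ (n + 1) + 1) + 10 * pairSum t' = m := by
          rw [pairSum_decomp, hlen'] at hsum
          exact hsum
        have hmm := hsp (x + y)
        have hdig' : ∀ d ∈ t', d ≤ 9 := fun d hd => hdig d (by simp [hd])
        have hcase : x + y = m % 10 ∨ x + y = m % 10 + 10 := by omega
        rcases hcase with hc | hc
        · exact Or.inl ⟨by omega, by rw [← hc]; omega, t', hlen', hdig', by rw [← hc]; exact hm⟩
        · exact Or.inr ⟨by omega, by rw [← hc]; omega, t', hlen', hdig', by rw [← hc]; exact hm⟩
lemma branchF_iff (n m s : ℕ) (hs : s % 10 = m % 10) :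
    ((if 1 ≤ (s : Int) ∧ (s : Int) ≤ 18 then
       (if 0 ≤ (m : Int) - (s : Int) * ((10 : Int) ^ (n + 1) + 1) then
          innerB (n : Int) (PySem.Int.floordiv ((m : Int) - (s : Int) * ((10 : Int) ^ (n + 1) + 1)) 10)
        else false)
     else false) = true) ↔
    (1 ≤ s ∧ s ≤ 18 ∧ s * (10 ^ (n + 1) + 1) ≤ m ∧
      ∃ t : List ℕ, t.length = n ∧ (∀ d ∈ t, d ≤ 9) ∧
        s * (10 ^ (n + 1) + 1) + 10 * pairSum t = m) := by
  have hb1 : ((s * (10 ^ (n + 1) + 1) : ℕ) : Int) = (s : Int) * ((10 : Int) ^ (n + 1) + 1) := by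
    push_cast; ring
  have hsplit : s * (10 ^ (n + 1) + 1) = 10 * (s * 10 ^ n) + s := by ring
  by_cases h18 : 1 ≤ s ∧ s ≤ 18
  · rw [if_pos (by exact_mod_cast h18)]
    by_cases hle : s * (10 ^ (n + 1) + 1) ≤ m
    · have hr : (m : Int) - (s : Int) * ((10 : Int) ^ (n + 1) + 1)
          = ((m - s * (10 ^ (n + 1) + 1) : ℕ) : Int) := by
        push_cast [hle]; ring
      have hdvd : 10 ∣ (m - s * (10 ^ (n + 1) + 1)) := by omega
      obtain ⟨m', hm'⟩ := hdvd
      have hfd : PySem.Int.floordiv ((m - s * (10 ^ (n + 1) + 1) : ℕ) : Int) 10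
          = ((m' : ℕ) : Int) := by
        have h := PySem.Int.floordiv_natCast (m - s * (10 ^ (n + 1) + 1)) 10
        simp only [Nat.cast_ofNat] at h
        rw [h]
        congr 1
        omega
      rw [hr, hfd, if_pos (by positivity), innerB_iff n m']
      constructor
      · rintro ⟨t, h1, h2, h3⟩
        exact ⟨h18.1, h18.2, hle, t, h1, h2, by omega⟩
      · rintro ⟨_, _, _, t, h1, h2, h3⟩
        exact ⟨t, h1, h2, by omega⟩
    · rw [if_neg (by intro hc; rw [← hb1] at hc; exact hle (by omega))]
      constructor
      · intro h; cases h
      · rintro ⟨_, _, hc, -⟩; exact absurd hc hle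
  · rw [if_neg (by intro hc; exact h18 (by exact_mod_cast hc))]
    constructor
    · intro h; cases h
    · rintro ⟨hc1, hc2, -⟩; exact absurd ⟨hc1, hc2⟩ h18

lemma feasibleB_iff (k m : ℕ) (hk : 1 ≤ k) :
    feasibleB (k : Int) (m : Int) = true ↔
      ∃ t : List ℕ, t.length = k ∧ (∀ d ∈ t, d ≤ 9) ∧ t.getLast?.getD 0 ≠ 0 ∧ pairSum t = m := by
  match k with
  | 0 => omega
  | 1 =>
    rw [feasibleB]
    norm_num
    constructor
    · rintro ⟨⟨h1, h2⟩, h3⟩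
      have hdvd : 2 ∣ m := by exact_mod_cast h1
      obtain ⟨c, hc⟩ := hdvd
      refine ⟨[m / 2], rfl, by intro d hd; simp at hd; omega, by simp; omega, ?_⟩
      simp [pairSum, Nat.ofDigits]
      omega
    · rintro ⟨t, h1, h2, h4, h3⟩
      rw [List.length_eq_one_iff] at h1
      obtain ⟨a, rfl⟩ := h1
      simp [pairSum, Nat.ofDigits] at h3
      simp at h4
      have ha : a ≤ 9 := h2 a (by simp)
      refine ⟨⟨?_, by omega⟩, by omega⟩
      exact_mod_cast (⟨a, by omega⟩ : 2 ∣ m)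
  | (n + 2) =>
    rw [feasibleB]
    rw [if_neg (by simp only [beq_iff_eq]; push_cast; omega)]
    have e1 : ((((n + 2 : ℕ) : Int)) - 1).toNat = n + 1 := by push_cast; omega
    have e3 : (((n + 2 : ℕ) : Int)) - 2 = ((n : ℕ) : Int) := by push_cast; ring
    have hmod : PySem.Int.mod ((m : ℕ) : Int) 10 = ((m % 10 : ℕ) : Int) := by
      simp
    have hadd : ((m % 10 : ℕ) : Int) + 10 = ((m % 10 + 10 : ℕ) : Int) := by push_cast; ring
    rw [e1, e3, hmod, hadd]
    rw [Bool.or_eq_true,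
        branchF_iff n m (m % 10) (by omega),
        branchF_iff n m (m % 10 + 10) (by omega)]
    have hsp : ∀ s : ℕ, s * (10 ^ (n + 1) + 1) = 10 * (s * 10 ^ n) + s := fun s => by ring
    constructor
    · rintro (⟨h1, h18, hle, t, ht1, ht2, ht3⟩ | ⟨h1, h18, hle, t, ht1, ht2, ht3⟩)
      · obtain ⟨g1, g2, g3, g4⟩ := build_outer n m (m % 10) t h18 ht1 ht2 ht3
        exact ⟨_, g1, g2, by rw [g3]; omega, g4⟩
      · obtain ⟨g1, g2, g3, g4⟩ := build_outer n m (m % 10 + 10) t h18 ht1 ht2 ht3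
        exact ⟨_, g1, g2, by rw [g3]; omega, g4⟩
    · rintro ⟨t, hlen, hdig, hlast, hsum⟩
      obtain ⟨x, t', y, rfl, hlen'⟩ := shape_of_length hlen
      have hx : x ≤ 9 := hdig x (by simp)
      have hy : y ≤ 9 := hdig y (by simp)
      have hy1 : 1 ≤ y := by
        rw [show (x :: (t' ++ [y])) = ((x :: t') ++ [y]) by simp,
            List.getLast?_concat, Option.getD_some] at hlast
        omega
      have hm : (x + y) * (10 ^ (n + 1) + 1) + 10 * pairSum t' = m := by
        rw [pairSum_decomp, hlen'] at hsum
        exact hsum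
      have hmm := hsp (x + y)
      have hdig' : ∀ d ∈ t', d ≤ 9 := fun d hd => hdig d (by simp [hd])
      have hcase : x + y = m % 10 ∨ x + y = m % 10 + 10 := by omega
      rcases hcase with hc | hc
      · exact Or.inl ⟨by omega, by omega, by rw [← hc]; omega, t', hlen', hdig', by rw [← hc]; exact hm⟩
      · exact Or.inr ⟨by omega, by omega, by rw [← hc]; omega, t', hlen', hdig', by rw [← hc]; exact hm⟩

lemma numDigitsB_eq (n : ℕ) (hn : 1 ≤ n) :
    numDigitsB (n : Int) = ((Nat.digits 10 n).length : Int) := by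
  induction n using Nat.strong_induction_on with
  | _ n ih =>
    rw [numDigitsB]
    rw [Nat.digits_def' (by norm_num) (by omega)]
    rcases Nat.lt_or_ge n 10 with h | h
    · rw [if_pos (by exact_mod_cast h)]
      rw [Nat.div_eq_of_lt h]
      simp
    · rw [if_neg (by omega)]
      rw [show PySem.Int.floordiv (n : Int) 10 = ((n / 10 : ℕ) : Int) from
        PySem.Int.floordiv_natCast n 10]
      rw [ih (n / 10) (by omega) (by omega)]
      simp
      omega

lemma exists_list_iff_exists_i (N : ℕ) :
    (∃ t : List ℕ, t ≠ [] ∧ (∀ d ∈ t, d ≤ 9) ∧ t.getLast?.getD 0 ≠ 0 ∧ pairSum t = N) ↔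
      (∃ i : ℕ, 0 < i ∧ i + natRev i = N) := by
  constructor
  · rintro ⟨t, hne, hdig, hlast, hsum⟩
    have hd : Nat.digits 10 (Nat.ofDigits 10 t) = t := by
      apply Nat.digits_ofDigits 10 (by norm_num)
      · exact fun x hx => by have := hdig x hx; omega
      · intro hh
        rw [List.getLast?_eq_some_getLast hne, Option.getD_some] at hlast
        exact hlast
    refine ⟨Nat.ofDigits 10 t, ?_, ?_⟩
    · rcases Nat.eq_zero_or_pos (Nat.ofDigits 10 t) with hz | hp
      · exfalso; rw [hz] at hd; simp [Nat.digits_zero] at hd; exact hne hd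
      · exact hp
    · rw [natRev, hd]; exact hsum
  · rintro ⟨i, hi, hsum⟩
    refine ⟨Nat.digits 10 i, ?_, ?_, ?_, ?_⟩
    · exact Nat.digits_ne_nil_iff_ne_zero.mpr (by omega)
    · exact fun x hx => by have := Nat.digits_lt_base (by norm_num) hx; omega
    · have hne : Nat.digits 10 i ≠ [] := Nat.digits_ne_nil_iff_ne_zero.mpr (by omega)
      rw [List.getLast?_eq_some_getLast hne, Option.getD_some]
      exact Nat.getLast_digit_ne_zero 10 (by omega)
    · rw [pairSum, Nat.ofDigits_digits, ← natRev]; exact hsum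

-- A's loop over [0, N], as the existence of a witness i
lemma A_any_iff (N : ℕ) (hN : 1 ≤ N) :
    ((PySem.List.pyRange 0 ((N : Int) + 1) 1).any
        (fun i => i + ((natRev i.toNat : ℕ) : Int) == (N : Int)) = true) ↔
      ∃ i : ℕ, 0 < i ∧ i + natRev i = N := by
  simp only [List.any_eq_true, PySem.List.mem_pyRange_one, beq_iff_eq]
  constructor
  · rintro ⟨i, ⟨h0, h1⟩, hq⟩
    rcases Nat.eq_zero_or_pos i.toNat with hz | hp
    · exfalso
      have hi0 : i = 0 := by omega
      subst hi0
      simp [natRev] at hq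
      omega
    · exact ⟨i.toNat, hp, by omega⟩
  · rintro ⟨i, hp, hs⟩
    refine ⟨(i : Int), ⟨by omega, by omega⟩, ?_⟩
    rw [Int.toNat_natCast]
    exact_mod_cast hs

-- B's loop over the candidate lengths, as the existence of a witness i
lemma B_any_iff (N : ℕ) :
    ((PySem.List.pyRange 1 (((Nat.digits 10 N).length : Int) + 1) 1).any
        (fun k => feasibleB k (N : Int)) = true) ↔
      ∃ i : ℕ, 0 < i ∧ i + natRev i = N := by
  simp only [List.any_eq_true, PySem.List.mem_pyRange_one]
  rw [← exists_list_iff_exists_i]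
  constructor
  · rintro ⟨k, ⟨h1, h2⟩, hq⟩
    rw [show k = ((k.toNat : ℕ) : Int) by omega] at hq
    obtain ⟨t, ht1, ht2, ht3, ht4⟩ := (feasibleB_iff k.toNat N (by omega)).mp hq
    exact ⟨t, by intro hh; rw [hh] at ht1; simp at ht1; omega, ht2, ht3, ht4⟩
  · rintro ⟨t, hne, hdig, hlast, hsum⟩
    refine ⟨(t.length : Int), ⟨?_, ?_⟩, ?_⟩
    · have := List.length_pos_iff.mpr hne
      omega
    · -- t is the digit list of some i ≤ N, so its length is at most that of N's digits
      have hi : Nat.ofDigits 10 t ≤ N := by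
        have : Nat.ofDigits 10 t ≤ pairSum t := by unfold pairSum; omega
        omega
      have hd : Nat.digits 10 (Nat.ofDigits 10 t) = t := by
        apply Nat.digits_ofDigits 10 (by norm_num)
        · exact fun x hx => by have := hdig x hx; omega
        · intro hh
          rw [List.getLast?_eq_some_getLast hne, Option.getD_some] at hlast
          exact hlast
      have := Nat.le_length_digits_le 10 (Nat.ofDigits 10 t) N hi
      rw [hd] at this
      omega
    · exact (feasibleB_iff t.length N
        (by have := List.length_pos_iff.mpr hne; omega)).mpr ⟨t, rfl, hdig, hlast, hsum⟩

-- ===== VERDICT (by name: the statement is the Claim_ definition above) =====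
theorem sumOfNumberAndReverse_spec : Claim_equal_sumOfNumberAndReverse := by
  intro num _
  unfold Spec_sumOfNumberAndReverse sumOfNumberAndReverse sumOfNumberAndReverse_alt
  by_cases h0 : num = 0
  · subst h0
    norm_num
  · have h0' : ¬ ((num == 0) = true) := by simpa using h0
    rcases Int.lt_or_le num 0 with hneg | hpos
    · rw [if_neg h0', if_pos hneg]
      rw [PySem.List.pyRange_one_eq_nil (a := PySem.Int.floordiv num 2) (b := num)
        (by rw [PySem.Int.le_floordiv_iff_mul_le (by norm_num)]; omega)]
      simp only [List.any_nil]
    · rw [if_neg (by omega : ¬ num < 0), if_neg h0', if_neg h0']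
      have hnum : 1 ≤ num := by omega
      conv_lhs => rw [PySem.List.any_congr_mem (g := fun i => i + ((natRev i.toNat : ℕ) : Int) == num)
        (by
          intro i hi
          have h1 := (PySem.List.mem_pyRange_one.mp hi).1
          have hrnn : 0 ≤ PySem.Int.floordiv num 2 := by
            rw [PySem.Int.le_floordiv_iff_mul_le (by norm_num)]; omega
          exact A_inner num i (by omega))]
      rw [range_equiv num hnum]
      set N : ℕ := num.toNat with hNdef
      have hcast : num = ((N : ℕ) : Int) := by omega
      rw [hcast, numDigitsB_eq N (by omega)]
      rw [Bool.eq_iff_iff, A_any_iff N (by omega), B_any_iff N]
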